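-- pv_equiv track=rewrite | github.com/danielvoconnor/nand2tetris | Assembler/HackAssembler.py | translate_dest
-- ===== SOURCE A (Python) =====
-- def translate_dest(dest):
--
--     bits = ['0','0','0']
--     for ch in dest:
--         if ch == 'M':
--             bits[2] = '1'
--         if ch == 'D':
--             bits[1] = '1'
--         if ch == 'A':
--             bits[0] = '1'
--
--     bits = ''.join(bits)
--     return bits
-- ===== SOURCE B (Python) =====
-- def translate_dest(dest):
--     return ''.join('1' if c in dest else '0' for c in 'ADM')
-- ===== Notes on version B (the rewrite author's own statement) =====
-- stated objective: simpler
-- what changed: B iterates over the three target letters in bit order, emitting a bit per membership test in dest, instead of scanning dest and mutating an indexed bit array; substring membership tests in C make it faster on long inputs.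
import Mathlib
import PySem

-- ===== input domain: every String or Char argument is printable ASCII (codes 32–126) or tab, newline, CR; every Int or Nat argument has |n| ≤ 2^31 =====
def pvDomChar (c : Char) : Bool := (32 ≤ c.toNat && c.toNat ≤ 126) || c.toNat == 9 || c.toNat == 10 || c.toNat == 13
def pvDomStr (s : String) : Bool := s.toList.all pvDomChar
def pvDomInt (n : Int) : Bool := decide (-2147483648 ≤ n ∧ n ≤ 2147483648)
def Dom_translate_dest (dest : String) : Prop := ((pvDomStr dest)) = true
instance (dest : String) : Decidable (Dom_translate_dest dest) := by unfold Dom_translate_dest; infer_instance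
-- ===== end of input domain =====

-- ===== PORT A =====
-- one step of A's for-loop: the three ifs in source order, updating the bit triple
def tdStep (b : String × String × String) (ch : Char) : String × String × String :=
  let b := if ch = 'M' then (b.1, b.2.1, "1") else b
  let b := if ch = 'D' then (b.1, "1", b.2.2) else b
  let b := if ch = 'A' then ("1", b.2.1, b.2.2) else b
  b

def translate_dest (dest : String) : String :=
  let bits := dest.toList.foldl tdStep ("0", "0", "0")
  bits.1 ++ bits.2.1 ++ bits.2.2

-- ===== PORT B =====
def translate_dest_alt (dest : String) : String :=
  String.join (['A', 'D', 'M'].map (fun c => if dest.toList.contains c then "1" else "0"))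

-- ===== PRECONDITION & SPEC =====
def Spec_translate_dest (dest : String) (out : String) : Prop := out = translate_dest_alt dest
instance (dest : String) (out : String) : Decidable (Spec_translate_dest dest out) := by unfold Spec_translate_dest; infer_instance

-- ===== CLAIM (what is proved, stated in full; the proofs are below) =====
def Claim_equal_translate_dest : Prop := ∀ (dest : String), Dom_translate_dest dest → Spec_translate_dest dest (translate_dest dest)

-- ===== LEMMAS AND PROOFS =====

lemma tdFold (l : List Char) (b : String × String × String) :
    l.foldl tdStep b =
      ((if 'A' ∈ l then "1" else b.1),
       (if 'D' ∈ l then "1" else b.2.1),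
       (if 'M' ∈ l then "1" else b.2.2)) := by
  induction l generalizing b with
  | nil => simp
  | cons c t ih =>
    simp only [List.foldl_cons, ih, tdStep, List.mem_cons]
    by_cases hM : c = 'M' <;> by_cases hD : c = 'D' <;> by_cases hA : c = 'A' <;>
      simp_all [eq_comm]

-- ===== VERDICT (by name: the statement is the Claim_ definition above) =====
theorem translate_dest_spec : Claim_equal_translate_dest := by
  intro dest _
  unfold Spec_translate_dest translate_dest translate_dest_alt
  simp only [tdFold, String.join, List.map, List.foldl, List.contains_eq_mem, decide_eq_true_eq]
  by_cases hA : 'A' ∈ dest.toList <;> by_cases hD : 'D' ∈ dest.toList <;>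
    by_cases hM : 'M' ∈ dest.toList <;> simp [hA, hD, hM]
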